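-- pv_equiv track=rewrite | github.com/Lasty-progs/InformationSecurityLabs | 4/main.py | SummKodBukvOtkr
-- ===== SOURCE A (Python) =====
-- a = 17
--
-- b = 11
--
-- c = 256
--
-- t0 = 172
--
-- def SummKodBukvOtkr(P):
--     Y = []
--     for i, item in enumerate(P):
--         Y.append(int(binXor(bin(ord(item)), t(i)), 2))
--
--     s = 0
--     for i in Y:
--         s += i
--     return s
--
-- def t(i):
--     if i == 0:
--         return bin(t0)
--     return bin((a*int(t(i-1), 2)+b)%c)
--
-- def binXor(a, b):
--     out = "0b"
--     for i, j in zip(a[2:], b[2:]):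
--         i , j = int(i), int(j)
--         out += str((i+j)%2)
--     return out
-- ===== SOURCE B (Python) =====
-- def SummKodBukvOtkr(P):
--     # One pass: carry the LCG value tv as a plain integer (A recomputes the
--     # whole chain recursively for every index) and accumulate the XOR of the
--     # left-aligned binary digits by Horner's rule instead of building a
--     # "0b..." string and re-parsing it with int in base 2.
--     s = 0
--     tv = 172
--     for ch in P:
--         v = 0
--         for i, j in zip(format(ord(ch), 'b'), format(tv, 'b')):
--             v = 2 * v + (int(i) ^ int(j))
--         s += v
--         tv = (17 * tv + 11) % 256
--     return s
-- ===== Notes on version B (the rewrite author's own statement) =====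
-- stated objective: faster
-- what changed: B makes one pass that carries the LCG value tv as an integer (A recomputes the whole LCG chain recursively for every character, O(n^2) steps) and accumulates the XOR of the left-aligned binary digits by Horner's rule instead of building a prefixed binary string and re-parsing it with int in base 2.
import Mathlib
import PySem

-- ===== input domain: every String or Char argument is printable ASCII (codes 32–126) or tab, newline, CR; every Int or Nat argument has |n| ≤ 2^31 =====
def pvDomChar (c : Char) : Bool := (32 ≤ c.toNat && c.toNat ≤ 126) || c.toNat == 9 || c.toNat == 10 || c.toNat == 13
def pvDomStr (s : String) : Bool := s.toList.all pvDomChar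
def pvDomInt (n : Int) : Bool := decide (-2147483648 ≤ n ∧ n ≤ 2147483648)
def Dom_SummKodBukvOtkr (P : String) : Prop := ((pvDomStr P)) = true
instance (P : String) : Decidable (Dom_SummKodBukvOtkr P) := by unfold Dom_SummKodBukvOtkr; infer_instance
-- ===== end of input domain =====

-- B replaces A's per-index recursive recomputation of the LCG keystream (O(n^2) steps)
-- by one pass that carries the LCG value, and the build-binary-string-then-reparse XOR by a
-- Horner accumulation over the zipped binary digits; return value only, no side effects.

-- ===== PORT A =====
-- int(c) for a one-character string c; the .getD 0 is unreachable here: every char fed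
-- to it is a binary digit '0'/'1', on which Python's int returns normally.
def chInt (c : Char) : Int := (PySem.Int.ofChars? [c]).getD 0

-- binXor: zips the two strings past their "0b" prefixes (a[2:] = drop 2) and appends
-- str((int(i)+int(j))%2) to the accumulator string, starting from "0b".
def binXorA (x y : List Char) : List Char :=
  (List.zip (x.drop 2) (y.drop 2)).foldl
    (fun out p => out ++ PySem.Int.toChars (PySem.Int.mod (chInt p.1 + chInt p.2) 2))
    ['0', 'b']

-- t(i): recursive LCG, returning bin(...) strings; int(s, 2) = ofCharsBase? s 2, whose
-- .getD 0 is unreachable (the argument is always a well-formed "0b..." string).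
def tA : Nat → List Char
  | 0 => PySem.Int.toBinChars0b 172
  | i + 1 =>
      PySem.Int.toBinChars0b
        (PySem.Int.mod (17 * ((PySem.Int.ofCharsBase? (tA i) 2).getD 0) + 11) 256)

-- A: builds the list Y by appending, then sums it with a second loop.
-- pr.1 is the enumerate index, always ≥ 0, so .toNat is exact.
def SummKodBukvOtkr (P : String) : Int :=
  let Y : List Int :=
    (PySem.List.enumerate P.toList 0).foldl
      (fun Y pr =>
        Y ++ [(PySem.Int.ofCharsBase?
                (binXorA (PySem.Int.toBinChars0b ((pr.2.toNat : Int))) (tA pr.1.toNat))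
                2).getD 0])
      []
  Y.foldl (fun s i => s + i) 0

-- ===== PORT B =====
-- One pass; state (s, tv); per char a Horner fold over zip(format(ord ch,'b'), format(tv,'b')).
def SummKodBukvOtkr_alt (P : String) : Int :=
  (P.toList.foldl
    (fun (st : Int × Int) ch =>
      (st.1 +
         (List.zip (PySem.Int.toBinChars (ch.toNat : Int)) (PySem.Int.toBinChars st.2)).foldl
           (fun v p => 2 * v + PySem.Int.bxor (chInt p.1) (chInt p.2)) 0,
       PySem.Int.mod (17 * st.2 + 11) 256))
    (0, 172)).1

-- ===== PRECONDITION & SPEC =====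
def Spec_SummKodBukvOtkr (P : String) (out : Int) : Prop := out = SummKodBukvOtkr_alt P
instance (P : String) (out : Int) : Decidable (Spec_SummKodBukvOtkr P out) := by
  unfold Spec_SummKodBukvOtkr; infer_instance

-- ===== CLAIM =====
def Claim_equal_SummKodBukvOtkr : Prop :=
  ∀ (P : String), Dom_SummKodBukvOtkr P → Spec_SummKodBukvOtkr P (SummKodBukvOtkr P)

-- ===== LEMMAS AND PROOFS =====

-- the LCG stream as plain integers
def lcg : Nat → Int
  | 0 => 172
  | i + 1 => PySem.Int.mod (17 * lcg i + 11) 256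

def bitv (c : Char) : Nat := if c = '1' then 1 else 0

def bitChar (p : Char × Char) : Char :=
  if PySem.Int.mod (chInt p.1 + chInt p.2) 2 = 1 then '1' else '0'

def hornerN (l : List Char) (a : Nat) : Nat := l.foldl (fun v c => 2 * v + bitv c) a

def pad : Nat → Nat → List Char
  | 0, _ => []
  | w + 1, m => pad w (m / 2) ++ [if m % 2 = 1 then '1' else '0']

abbrev isBit (c : Char) : Prop := c = '0' ∨ c = '1'

lemma lcg_bounds (i : Nat) : 0 ≤ lcg i ∧ lcg i < 256 := by
  induction i with
  | zero => exact ⟨by norm_num [lcg], by norm_num [lcg]⟩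
  | succ n ih =>
      exact ⟨PySem.Int.mod_nonneg _ (by norm_num), PySem.Int.mod_lt _ (by norm_num)⟩

def bitsOkB (n : Nat) : Bool :=
  (PySem.Int.toBinChars (n : Int)).all (fun c => c == '0' || c == '1')
  && 1 ≤ (PySem.Int.toBinChars (n : Int)).length
  && (PySem.Int.toBinChars (n : Int)).length ≤ 8

set_option maxRecDepth 10000 in
lemma bitsOk_all : (List.range 256).all bitsOkB = true := by decide

set_option maxRecDepth 10000 in
lemma len127_all :
    (List.range 127).all (fun n => (PySem.Int.toBinChars (n : Int)).length ≤ 7) = true := by decide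

set_option maxRecDepth 10000 in
lemma parsePad_all : (List.range 7).all (fun w => (List.range (2 ^ (w + 1))).all (fun m =>
    PySem.Int.ofCharsBase? ('0' :: 'b' :: pad (w + 1) m) 2 == some (m : Int))) = true := by decide

set_option maxRecDepth 10000 in
lemma roundtrip_all : (List.range 256).all (fun n =>
    (PySem.Int.ofCharsBase? (PySem.Int.toBinChars0b (n : Int)) 2).getD 0 == (n : Int)) = true := by
  decide

lemma digits_ok_256 : ∀ y : Fin 256,
    (∀ c ∈ PySem.Int.toBinChars (y : Int), isBit c) ∧
    1 ≤ (PySem.Int.toBinChars (y : Int)).length ∧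
    (PySem.Int.toBinChars (y : Int)).length ≤ 8 := by
  intro y
  have h := List.all_eq_true.1 bitsOk_all _ (List.mem_range.2 y.isLt)
  simp only [bitsOkB, Bool.and_eq_true, List.all_eq_true, beq_iff_eq, Bool.or_eq_true,
    decide_eq_true_eq] at h
  exact ⟨fun c hc => h.1.1 c hc, h.1.2, h.2⟩

lemma digits_ok_127 : ∀ x : Fin 127,
    (PySem.Int.toBinChars (x : Int)).length ≤ 7 := by
  intro x
  have h := List.all_eq_true.1 len127_all _ (List.mem_range.2 x.isLt)
  simpa using h

lemma parse_pad : ∀ w : Fin 7, ∀ m : Fin 128, (m : Nat) < 2 ^ ((w : Nat) + 1) →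
    PySem.Int.ofCharsBase? ('0' :: 'b' :: pad ((w : Nat) + 1) (m : Nat)) 2
      = some ((m : Nat) : Int) := by
  intro w m hm
  have h1 := List.all_eq_true.1 parsePad_all _ (List.mem_range.2 w.isLt)
  have h2 := List.all_eq_true.1 h1 _ (List.mem_range.2 hm)
  exact eq_of_beq h2

lemma roundtrip256 : ∀ y : Fin 256,
    (PySem.Int.ofCharsBase? (PySem.Int.toBinChars0b (y : Int)) 2).getD 0 = (y : Int) := by
  intro y
  have h := List.all_eq_true.1 roundtrip_all _ (List.mem_range.2 y.isLt)
  exact eq_of_beq h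

lemma horner_append (ds : List Char) (c : Char) (a : Nat) :
    hornerN (ds ++ [c]) a = 2 * hornerN ds a + bitv c := by
  simp [hornerN, List.foldl_append]

lemma pad_horner : ∀ ds : List Char, (∀ c ∈ ds, isBit c) →
    pad ds.length (hornerN ds 0) = ds ∧ hornerN ds 0 < 2 ^ ds.length := by
  intro ds
  induction ds using List.reverseRecOn with
  | nil => intro _; exact ⟨rfl, by norm_num [hornerN]⟩
  | append_singleton ds c ih =>
      intro hb
      have hds : ∀ x ∈ ds, isBit x := fun x hx => hb x (by simp [hx])
      have hc : isBit c := hb c (by simp)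
      obtain ⟨hpad, hlt⟩ := ih hds
      have hb1 : bitv c ≤ 1 := by rcases hc with rfl | rfl <;> simp [bitv]
      rw [horner_append]
      constructor
      · have hlen : (ds ++ [c]).length = ds.length + 1 := by simp
        rw [hlen, pad]
        have hdiv : (2 * hornerN ds 0 + bitv c) / 2 = hornerN ds 0 := by omega
        have hmod : (2 * hornerN ds 0 + bitv c) % 2 = bitv c := by omega
        rw [hdiv, hmod, hpad]
        rcases hc with rfl | rfl <;> simp [bitv]
      · have : (2:Nat) ^ (ds ++ [c]).length = 2 * 2 ^ ds.length := by
          simp [List.length_append, pow_succ]; ring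
        omega

lemma binXorA_eq (dx dy : List Char) (hx : ∀ c ∈ dx, isBit c) (hy : ∀ c ∈ dy, isBit c) :
    binXorA ('0' :: 'b' :: dx) ('0' :: 'b' :: dy)
      = '0' :: 'b' :: (List.zip dx dy).map bitChar := by
  unfold binXorA
  simp only [List.drop_succ_cons, List.drop_zero]
  rw [PySem.List.foldl_congr_mem _ _ (fun out p => out ++ [bitChar p])]
  · rw [PySem.List.foldl_append_singleton_eq_map]
    rfl
  · rintro acc ⟨i, j⟩ hp
    have h1 : isBit i := hx _ (List.of_mem_zip hp).1
    have h2 : isBit j := hy _ (List.of_mem_zip hp).2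
    rcases h1 with rfl | rfl <;> rcases h2 with rfl | rfl <;> rfl

lemma bits_map (l : List (Char × Char)) (h : ∀ p ∈ l, isBit p.1 ∧ isBit p.2) :
    ∀ c ∈ l.map bitChar, isBit c := by
  intro c hc
  rcases List.mem_map.1 hc with ⟨p, hp, rfl⟩
  rcases h p hp with ⟨h1, h2⟩
  rcases h1 with h1 | h1 <;> rcases h2 with h2 | h2 <;>
    simp [bitChar, h1, h2, isBit] <;> decide

lemma bfold_horner : ∀ l : List (Char × Char), (∀ p ∈ l, isBit p.1 ∧ isBit p.2) →
    ∀ a : Nat,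
      l.foldl (fun v p => 2 * v + PySem.Int.bxor (chInt p.1) (chInt p.2)) ((a : Nat) : Int)
        = ((hornerN (l.map bitChar) a : Nat) : Int) := by
  intro l
  induction l with
  | nil => intro _ a; simp [hornerN]
  | cons p l ih =>
      intro h a
      have hp := h p (by simp)
      have hrest : ∀ q ∈ l, isBit q.1 ∧ isBit q.2 := fun q hq => h q (by simp [hq])
      have hx : PySem.Int.bxor (chInt p.1) (chInt p.2) = ((bitv (bitChar p) : Nat) : Int) := by
        cases p with
        | mk i j => rcases hp.1 with rfl | rfl <;> rcases hp.2 with rfl | rfl <;> rfl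
      have hstep : (2 * ((a : Nat) : Int) + PySem.Int.bxor (chInt p.1) (chInt p.2))
          = ((2 * a + bitv (bitChar p) : Nat) : Int) := by rw [hx]; push_cast; ring
      simp only [List.foldl_cons, List.map_cons, hornerN] at *
      rw [hstep, ih hrest (2 * a + bitv (bitChar p))]

lemma t_eq (i : Nat) : tA i = PySem.Int.toBinChars0b (lcg i) := by
  induction i with
  | zero => rfl
  | succ n ih =>
      have hb := lcg_bounds n
      have hy : (lcg n).toNat < 256 := by omega
      have h := roundtrip256 ⟨(lcg n).toNat, hy⟩
      rw [Int.toNat_of_nonneg hb.1] at h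
      show PySem.Int.toBinChars0b
        (PySem.Int.mod (17 * ((PySem.Int.ofCharsBase? (tA n) 2).getD 0) + 11) 256)
        = PySem.Int.toBinChars0b (lcg (n + 1))
      rw [ih, h]
      rfl

lemma toBinChars0b_eq (n : Int) (h : 0 ≤ n) :
    PySem.Int.toBinChars0b n = '0' :: 'b' :: PySem.Int.toBinChars n := by
  simp [PySem.Int.toBinChars0b, PySem.Int.toBinChars, not_lt.2 h]

lemma perChar (c : Char) (hc : c.toNat < 127) (t : Int) (h0 : 0 ≤ t) (h1 : t < 256) :
    (PySem.Int.ofCharsBase?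
        (binXorA (PySem.Int.toBinChars0b ((c.toNat : Int))) (PySem.Int.toBinChars0b t)) 2).getD 0
      = (List.zip (PySem.Int.toBinChars (c.toNat : Int)) (PySem.Int.toBinChars t)).foldl
          (fun v p => 2 * v + PySem.Int.bxor (chInt p.1) (chInt p.2)) 0 := by
  obtain ⟨n, rfl⟩ : ∃ n : Nat, t = (n : Int) := ⟨t.toNat, (Int.toNat_of_nonneg h0).symm⟩
  have hn : n < 256 := by exact_mod_cast h1
  obtain ⟨hxb, hx1, -⟩ := digits_ok_256 ⟨c.toNat, by omega⟩
  have hx7 := digits_ok_127 ⟨c.toNat, hc⟩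
  obtain ⟨hyb, hy1, hy8⟩ := digits_ok_256 ⟨n, hn⟩
  rw [toBinChars0b_eq _ (Int.natCast_nonneg c.toNat), toBinChars0b_eq _ (Int.natCast_nonneg n)]
  rw [binXorA_eq _ _ hxb hyb]
  set dx := PySem.Int.toBinChars (c.toNat : Int) with hdx
  set dy := PySem.Int.toBinChars (n : Int) with hdy
  have hzip : ∀ q ∈ List.zip dx dy, isBit q.1 ∧ isBit q.2 := by
    rintro ⟨i, j⟩ hq
    exact ⟨hxb _ (List.of_mem_zip hq).1, hyb _ (List.of_mem_zip hq).2⟩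
  set ds := (List.zip dx dy).map bitChar with hds
  have hdsbits : ∀ x ∈ ds, isBit x := bits_map _ hzip
  obtain ⟨hpad, hlt⟩ := pad_horner ds hdsbits
  have hlen : ds.length = min dx.length dy.length := by
    simp [hds, List.length_zip]
  have hlen1 : 1 ≤ ds.length := by omega
  have hlen7 : ds.length ≤ 7 := by omega
  have hm : hornerN ds 0 < 128 := by
    have h2 : (2:Nat) ^ ds.length ≤ 2 ^ 7 := Nat.pow_le_pow_right (by norm_num) hlen7
    omega
  have hw : ds.length - 1 + 1 = ds.length := by omega
  have hp := parse_pad ⟨ds.length - 1, by omega⟩ ⟨hornerN ds 0, hm⟩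
    (by rw [Fin.val_mk, Fin.val_mk, hw]; exact hlt)
  rw [hw, hpad] at hp
  rw [hp]
  have hbf := bfold_horner (List.zip dx dy) hzip 0
  norm_num at hbf
  rw [hbf]
  simp [hds]

lemma bLoop_fst (l : List Char) : ∀ (s t : Int),
    (l.foldl
      (fun (st : Int × Int) ch =>
        (st.1 +
           (List.zip (PySem.Int.toBinChars (ch.toNat : Int)) (PySem.Int.toBinChars st.2)).foldl
             (fun v p => 2 * v + PySem.Int.bxor (chInt p.1) (chInt p.2)) 0,
         PySem.Int.mod (17 * st.2 + 11) 256))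
      (s, t)).1
    = s + (l.foldl
      (fun (st : Int × Int) ch =>
        (st.1 +
           (List.zip (PySem.Int.toBinChars (ch.toNat : Int)) (PySem.Int.toBinChars st.2)).foldl
             (fun v p => 2 * v + PySem.Int.bxor (chInt p.1) (chInt p.2)) 0,
         PySem.Int.mod (17 * st.2 + 11) 256))
      (0, t)).1 := by
  induction l with
  | nil => intro s t; simp
  | cons c l ih =>
      intro s t
      simp only [List.foldl_cons]
      rw [ih, ih (0 + _)]
      ring_nf

lemma master (l : List Char) (h : ∀ c ∈ l, c.toNat < 127) : ∀ (k : Nat) (Y0 : List Int),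
    (((PySem.List.enumerate l (k : Int)).foldl
        (fun Y pr =>
          Y ++ [(PySem.Int.ofCharsBase?
                  (binXorA (PySem.Int.toBinChars0b ((pr.2.toNat : Int))) (tA pr.1.toNat))
                  2).getD 0])
        Y0).foldl (fun s i => s + i) 0)
    = Y0.foldl (fun s i => s + i) 0
      + (l.foldl
          (fun (st : Int × Int) ch =>
            (st.1 +
               (List.zip (PySem.Int.toBinChars (ch.toNat : Int)) (PySem.Int.toBinChars st.2)).foldl
                 (fun v p => 2 * v + PySem.Int.bxor (chInt p.1) (chInt p.2)) 0,
             PySem.Int.mod (17 * st.2 + 11) 256))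
          (0, lcg k)).1 := by
  induction l with
  | nil => intro k Y0; simp [PySem.List.enumerate]
  | cons c l ih =>
      intro k Y0
      have hc : c.toNat < 127 := h c (by simp)
      have hrest : ∀ x ∈ l, x.toNat < 127 := fun x hx => h x (by simp [hx])
      rw [PySem.List.enumerate_cons]
      simp only [List.foldl_cons]
      have hk1 : ((k : Int) + 1) = ((k + 1 : Nat) : Int) := by push_cast; ring
      rw [hk1, ih hrest (k + 1)]
      have hbnd := lcg_bounds k
      have hval : (PySem.Int.ofCharsBase?
          (binXorA (PySem.Int.toBinChars0b ((((k : Int), c).2.toNat : Int)))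
            (tA ((k : Int), c).1.toNat)) 2).getD 0
          = (List.zip (PySem.Int.toBinChars (c.toNat : Int))
              (PySem.Int.toBinChars (lcg k))).foldl
              (fun v p => 2 * v + PySem.Int.bxor (chInt p.1) (chInt p.2)) 0 := by
        show (PySem.Int.ofCharsBase?
          (binXorA (PySem.Int.toBinChars0b ((c.toNat : Int))) (tA (k : Int).toNat)) 2).getD 0 = _
        rw [Int.toNat_natCast, t_eq k]
        exact perChar c hc (lcg k) hbnd.1 hbnd.2
      rw [List.foldl_append]
      simp only [List.foldl_cons, List.foldl_nil]
      rw [hval]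
      have hnext : PySem.Int.mod (17 * lcg k + 11) 256 = lcg (k + 1) := rfl
      rw [hnext]
      conv_rhs => rw [bLoop_fst]
      ring

-- ===== VERDICT =====
theorem SummKodBukvOtkr_spec : Claim_equal_SummKodBukvOtkr := by
  intro P hdom
  unfold Spec_SummKodBukvOtkr SummKodBukvOtkr SummKodBukvOtkr_alt
  have hchars : ∀ c ∈ P.toList, c.toNat < 127 := by
    intro c hc
    have := hdom
    unfold Dom_SummKodBukvOtkr pvDomStr at this
    rw [List.all_eq_true] at this
    have hb := this c hc
    unfold pvDomChar at hb
    simp only [Bool.or_eq_true, Bool.and_eq_true, decide_eq_true_eq, beq_iff_eq] at hb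
    omega
  have := master P.toList hchars 0 []
  simp only [Nat.cast_zero] at this
  rw [this]
  simp [lcg]
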